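-- pv_equiv track=rewrite | github.com/manastria/dotfile | bin/scrub-auth.py | scrub_netrc
-- ===== SOURCE A (Python) =====
-- from typing import Callable, Dict, List, Optional, Sequence
--
-- NETRC_HOST_PREFIXES = ("github.", "gitlab.", "bitbucket.")
--
-- def scrub_netrc(content: str) -> str:
--     lines = content.splitlines()
--     result: List[str] = []
--     skip = False
--     for line in lines:
--         stripped = line.strip()
--         if stripped.lower().startswith("machine "):
--             parts = stripped.split()
--             if len(parts) >= 2:
--                 host = parts[1].lower()
--                 if any(host.startswith(prefix) for prefix in NETRC_HOST_PREFIXES):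
--                     skip = True
--                     continue
--         if skip:
--             if stripped == "":
--                 skip = False
--             continue
--         result.append(line)
--     cleaned = "\n".join(result)
--     if content.endswith("\n"):
--         cleaned += "\n"
--     return cleaned
-- ===== SOURCE B (Python) =====
-- NETRC_HOST_PREFIXES = ("github.", "gitlab.", "bitbucket.")
--
--
-- def _is_scrub_entry(line):
--     stripped = line.strip()
--     if not stripped.lower().startswith("machine "):
--         return False
--     parts = stripped.split()
--     return len(parts) >= 2 and parts[1].lower().startswith(NETRC_HOST_PREFIXES)
--
--
-- def scrub_netrc(content):
--     lines = content.splitlines()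
--     # stage 1: group the lines into blocks, each block ending with its blank line
--     blocks = []
--     cur = []
--     for line in lines:
--         cur.append(line)
--         if line.strip() == "":
--             blocks.append(cur)
--             cur = []
--     if cur:
--         blocks.append(cur)
--     # stage 2: truncate each block at its first scrubbed git-host entry line
--     kept = []
--     for block in blocks:
--         for line in block:
--             if _is_scrub_entry(line):
--                 break
--             kept.append(line)
--     cleaned = "\n".join(kept)
--     if content.endswith("\n"):
--         cleaned += "\n"
--     return cleaned
-- ===== Notes on version B (the rewrite author's own statement) =====
-- stated objective: alternative
-- what changed: Replaces A's single stateful pass with a carried skip flag by two staged passes: first group the lines into blank-line-terminated blocks, then truncate each block at its first matched git-host entry line and concatenate the kept prefixes.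
import Mathlib
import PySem

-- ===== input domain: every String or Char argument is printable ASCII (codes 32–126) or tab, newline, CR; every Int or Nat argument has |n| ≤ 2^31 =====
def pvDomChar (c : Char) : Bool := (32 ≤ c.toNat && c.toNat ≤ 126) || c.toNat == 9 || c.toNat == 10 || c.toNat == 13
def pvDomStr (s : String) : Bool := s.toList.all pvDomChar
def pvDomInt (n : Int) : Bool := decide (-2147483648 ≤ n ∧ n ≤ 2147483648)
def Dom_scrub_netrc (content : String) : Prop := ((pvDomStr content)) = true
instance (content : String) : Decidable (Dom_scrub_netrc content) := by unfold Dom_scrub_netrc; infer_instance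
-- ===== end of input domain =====

-- B replaces A's single pass with a carried skip flag by two staged passes:
-- group the lines into blank-line-terminated blocks, then truncate each block
-- at its first matched git-host entry line (objective: alternative, same cost).

-- ===== PORT A =====
-- the body of A's for-loop over lines, carrying (result, skip)
def scrubStep (st : List String × Bool) (line : String) : List String × Bool :=
  let result := st.1
  let skip := st.2
  let stripped := PySem.Str.strip line
  -- the code reached when no 'continue' fired in the machine-line check
  let fall : List String × Bool :=
    if skip then
      if stripped = "" then (result, false) else (result, skip)
    else (result ++ [line], skip)
  if PySem.Str.startswith (PySem.Str.lower stripped) "machine " then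
    let parts := PySem.Str.split₀ stripped
    if parts.length ≥ 2 then
      match PySem.List.pyGet? parts 1 with   -- parts[1], in range since len ≥ 2
      | some p =>
        let host := PySem.Str.lower p
        if ["github.", "gitlab.", "bitbucket."].any (fun pre => PySem.Str.startswith host pre) then
          (result, true)
        else fall
      | none => fall
    else fall
  else fall

def scrub_netrc (content : String) : String :=
  let lines := PySem.Str.splitlines content
  let st := lines.foldl scrubStep ([], false)
  let cleaned := PySem.Str.join "\n" st.1
  if PySem.Str.endswith content "\n" then PySem.Str.join "" [cleaned, "\n"] else cleaned

-- ===== PORT B =====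
def isScrubEntry (line : String) : Bool :=
  let stripped := PySem.Str.strip line
  if PySem.Str.startswith (PySem.Str.lower stripped) "machine " then
    match PySem.Str.split₀ stripped with   -- len(parts) ≥ 2 and parts[1] as a pattern match
    | _ :: h :: _ =>
        ["github.", "gitlab.", "bitbucket."].any (fun pre => PySem.Str.startswith (PySem.Str.lower h) pre)
    | _ => false
  else false

-- stage 1 loop body: carry (blocks, cur); a blank line closes the current block
def blockStep (st : List (List String) × List String) (line : String) :
    List (List String) × List String :=
  let cur := st.2 ++ [line]
  if PySem.Str.strip line = "" then (st.1 ++ [cur], []) else (st.1, cur)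

-- stage 2 inner loop: keep lines of a block until the first scrubbed entry (break)
def takeUntilEntry : List String → List String
  | [] => []
  | l :: ls => if isScrubEntry l then [] else l :: takeUntilEntry ls

def scrub_netrc_alt (content : String) : String :=
  let lines := PySem.Str.splitlines content
  let st := lines.foldl blockStep ([], [])
  let blocks := if st.2 = [] then st.1 else st.1 ++ [st.2]
  let kept := blocks.flatMap takeUntilEntry
  let cleaned := PySem.Str.join "\n" kept
  if PySem.Str.endswith content "\n" then PySem.Str.join "" [cleaned, "\n"] else cleaned

-- ===== PRECONDITION & SPEC =====
def Spec_scrub_netrc (content : String) (out : String) : Prop := out = scrub_netrc_alt content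
instance (content : String) (out : String) : Decidable (Spec_scrub_netrc content out) := by unfold Spec_scrub_netrc; infer_instance

-- ===== CLAIM (what is proved, stated in full; the proofs are below) =====
def Claim_equal_scrub_netrc : Prop := ∀ (content : String), Dom_scrub_netrc content → Spec_scrub_netrc content (scrub_netrc content)

-- ===== LEMMAS AND PROOFS =====

-- common recursive characterization: A's flag loop and B's staged passes both
-- compute scrubLines (the explicit-cursor form)

def dropEntry : List String → List String
  | [] => []
  | l :: ls => if PySem.Str.strip l = "" then ls else dropEntry ls

theorem dropEntry_length_le (ls : List String) : (dropEntry ls).length ≤ ls.length := by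
  induction ls with
  | nil => simp [dropEntry]
  | cons l ls ih => simp only [dropEntry]; split; · simp
                    · simp; omega

def scrubLines : List String → List String
  | [] => []
  | l :: ls =>
      if isScrubEntry l then scrubLines (dropEntry ls)
      else l :: scrubLines ls
termination_by ls => ls.length
decreasing_by
  · have := dropEntry_length_le ls; simp; omega
  · simp

-- A's loop body, expressed through B's entry test
set_option maxHeartbeats 2000000 in
theorem scrubStep_eq (acc : List String) (skip : Bool) (l : String) :
    scrubStep (acc, skip) l =
      if isScrubEntry l then (acc, true)
      else if skip then (if PySem.Str.strip l = "" then (acc, false) else (acc, true))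
      else (acc ++ [l], false) := by
  unfold scrubStep isScrubEntry
  cases hsw : PySem.Str.startswith (PySem.Str.lower (PySem.Str.strip l)) "machine " with
  | false =>
      simp only [hsw, Bool.false_eq_true, if_false]
      cases skip <;> rfl
  | true =>
    simp only [hsw, if_true]
    cases hp : PySem.Str.split₀ (PySem.Str.strip l) with
    | nil =>
        simp only [List.length_nil]
        norm_num
        cases skip <;> rfl
    | cons a t =>
      cases t with
      | nil =>
          simp only [List.length_cons, List.length_nil]
          norm_num
          cases skip <;> rfl
      | cons b t' =>
        simp only [List.length_cons]
        norm_num [PySem.List.pyGet?, PySem.List.pyIdx?]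
        split
        · rfl
        · cases skip <;> rfl

theorem isScrubEntry_strip_ne (l : String) (h : isScrubEntry l = true) :
    PySem.Str.strip l ≠ "" := by
  intro he
  unfold isScrubEntry at h
  rw [he] at h
  revert h; decide

-- A's fold computes scrubLines
theorem foldl_scrubStep_eq (ls : List String) : ∀ acc : List String,
    (ls.foldl scrubStep (acc, false)).1 = acc ++ scrubLines ls ∧
    (ls.foldl scrubStep (acc, true)).1 = acc ++ scrubLines (dropEntry ls) := by
  induction ls with
  | nil => intro acc; simp [scrubLines, dropEntry]
  | cons l ls ih =>
    intro acc
    constructor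
    · by_cases hs : isScrubEntry l = true
      · rw [List.foldl_cons, scrubStep_eq, if_pos hs, scrubLines, if_pos hs]
        exact (ih acc).2
      · rw [List.foldl_cons, scrubStep_eq, if_neg hs, scrubLines,
            if_neg hs]
        simp only [Bool.false_eq_true, if_false]
        rw [(ih (acc ++ [l])).1]
        simp
    · by_cases hs : isScrubEntry l = true
      · rw [List.foldl_cons, scrubStep_eq, if_pos hs]
        have hne := isScrubEntry_strip_ne l hs
        rw [show dropEntry (l :: ls) = dropEntry ls from by
              simp [dropEntry, hne]]
        exact (ih acc).2
      · by_cases hb : PySem.Str.strip l = ""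
        · rw [List.foldl_cons, scrubStep_eq, if_neg hs]
          simp only [if_true, hb]
          rw [show dropEntry (l :: ls) = ls from by simp [dropEntry, hb]]
          exact (ih acc).1
        · rw [List.foldl_cons, scrubStep_eq, if_neg hs]
          simp only [if_true, if_neg hb]
          rw [show dropEntry (l :: ls) = dropEntry ls from by
                simp [dropEntry, hb]]
          exact (ih acc).2

-- recursive characterization of B's stage-1 grouping
def splitB : List String → List (List String)
  | [] => []
  | l :: ls =>
      if PySem.Str.strip l = "" then [l] :: splitB ls
      else match splitB ls with
        | [] => [[l]]
        | b :: bs => (l :: b) :: bs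

def glue (cur : List String) : List (List String) → List (List String)
  | [] => if cur = [] then [] else [cur]
  | b :: bs => (cur ++ b) :: bs

theorem glue_nil (blocks : List (List String)) : glue [] blocks = blocks := by
  cases blocks <;> simp [glue]

theorem foldl_blockStep_eq (ls : List String) : ∀ (bs : List (List String)) (cur : List String),
    (let st := ls.foldl blockStep (bs, cur);
     if st.2 = [] then st.1 else st.1 ++ [st.2]) = bs ++ glue cur (splitB ls) := by
  induction ls with
  | nil =>
      intro bs cur
      cases cur <;> simp [glue, splitB]
  | cons l ls ih =>
    intro bs cur
    by_cases hb : PySem.Str.strip l = ""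
    · rw [List.foldl_cons, show blockStep (bs, cur) l = (bs ++ [cur ++ [l]], []) from by
            simp [blockStep, hb]]
      rw [ih, glue_nil, splitB, if_pos hb]
      simp [glue]
    · rw [List.foldl_cons, show blockStep (bs, cur) l = (bs, cur ++ [l]) from by
            simp [blockStep, hb]]
      rw [ih, splitB, if_neg hb]
      rcases hsp : splitB ls with _ | ⟨b, bs'⟩ <;> simp [glue]

theorem splitB_dropEntry (ls : List String) :
    splitB (dropEntry ls) = (splitB ls).tail := by
  induction ls with
  | nil => simp [dropEntry, splitB]
  | cons l ls ih =>
    by_cases hb : PySem.Str.strip l = ""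
    · simp [dropEntry, splitB, hb]
    · rw [show dropEntry (l :: ls) = dropEntry ls from by simp [dropEntry, hb], ih]
      rw [splitB, if_neg hb]
      cases hsp : splitB ls <;> simp

theorem flatMap_takeUntil_splitB (n : ℕ) : ∀ ls : List String, ls.length ≤ n →
    (splitB ls).flatMap takeUntilEntry = scrubLines ls := by
  induction n with
  | zero =>
      intro ls h
      have : ls = [] := List.eq_nil_of_length_eq_zero (Nat.le_zero.mp h)
      subst this; simp [splitB, scrubLines]
  | succ n ih =>
    intro ls h
    cases ls with
    | nil => simp [splitB, scrubLines]
    | cons l ls =>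
      simp only [List.length_cons, Nat.succ_le_succ_iff] at h
      by_cases hs : isScrubEntry l = true
      · have hne := isScrubEntry_strip_ne l hs
        rw [scrubLines, if_pos hs, splitB, if_neg hne]
        have hlen : (dropEntry ls).length ≤ n :=
          le_trans (dropEntry_length_le ls) h
        cases hsp : splitB ls with
        | nil =>
            have : ls = [] := by
              cases ls with
              | nil => rfl
              | cons a t =>
                exfalso
                rw [splitB] at hsp
                revert hsp
                split
                · simp
                · split <;> simp
            subst this
            simp [dropEntry, scrubLines, takeUntilEntry, hs]
        | cons b bs =>
            dsimp only
            rw [List.flatMap_cons, show takeUntilEntry (l :: b) = [] from by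
                  simp [takeUntilEntry, hs]]
            have := splitB_dropEntry ls
            rw [hsp] at this
            simp only [List.tail_cons] at this
            rw [List.nil_append, ← this, ih _ hlen]
      · rw [scrubLines, if_neg hs, splitB]
        by_cases hb : PySem.Str.strip l = ""
        · rw [if_pos hb, List.flatMap_cons,
              show takeUntilEntry [l] = [l] from by simp [takeUntilEntry, hs],
              ih ls h]
          simp
        · rw [if_neg hb]
          cases hsp : splitB ls with
          | nil =>
              have : ls = [] := by
                cases ls with
                | nil => rfl
                | cons a t =>
                  exfalso
                  rw [splitB] at hsp
                  revert hsp
                  split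
                  · simp
                  · split <;> simp
              subst this
              simp [scrubLines, takeUntilEntry, hs]
          | cons b bs =>
              dsimp only
              rw [List.flatMap_cons, show takeUntilEntry (l :: b) = l :: takeUntilEntry b from by
                    simp [takeUntilEntry, hs]]
              have : (splitB ls).flatMap takeUntilEntry = scrubLines ls := ih ls h
              rw [hsp, List.flatMap_cons] at this
              simp [this]

-- ===== VERDICT (by name: the statement is the Claim_ definition above) =====
theorem scrub_netrc_spec : Claim_equal_scrub_netrc := by
  intro content _
  unfold Spec_scrub_netrc scrub_netrc scrub_netrc_alt
  dsimp only
  rw [(foldl_scrubStep_eq (PySem.Str.splitlines content) []).1,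
      foldl_blockStep_eq, glue_nil, List.nil_append, List.nil_append,
      flatMap_takeUntil_splitB (PySem.Str.splitlines content).length _ le_rfl]
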